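-- pv_equiv track=rewrite | github.com/lyfz-1/data-share | RQ4/result/metrics.py | cook_refs
-- ===== SOURCE A (Python) =====
-- def count_ngrams(words, n=4):
--     counts = {}
--     for k in range(1,n+1):
--         for i in range(len(words)-k+1):
--             ngram = tuple(words[i:i+k])
--             counts[ngram] = counts.get(ngram, 0)+1
--     return counts
--
-- def cook_refs(refs, n=4):
--
--     refs = [ref for ref in refs]
--     maxcounts = {}
--     for ref in refs:
--         counts = count_ngrams(ref, n)
--         for (ngram, count) in counts.items():
--             maxcounts[ngram] = max(maxcounts.get(ngram, 0), count)
--     return ([len(ref) for ref in refs], maxcounts)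
-- ===== SOURCE B (Python) =====
-- def cook_refs(refs, n=4):
--     refs = [ref for ref in refs]
--     # one flat stream of (reference-index, ngram) occurrences, across all refs
--     stream = [(j, tuple(ref[i:i+k]))
--               for j, ref in enumerate(refs)
--               for k in range(1, n+1)
--               for i in range(len(ref)-k+1)]
--     # one global count pass over the pairs
--     pair_counts = {}
--     for p in stream:
--         pair_counts[p] = pair_counts.get(p, 0) + 1
--     # one scan: keep, per ngram, the largest per-reference count seen
--     maxcounts = {}
--     for j, ng in stream:
--         c = pair_counts[(j, ng)]
--         if ng not in maxcounts or maxcounts[ng] < c: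
--             maxcounts[ng] = c
--     return ([len(ref) for ref in refs], maxcounts)
-- ===== Notes on version B (the rewrite author's own statement) =====
-- stated objective: alternative
-- what changed: B removes the per-reference dict-building-and-merge structure entirely: it flattens all references into one global stream of (reference-index, ngram) occurrence pairs, counts those pairs in one global pass, and then produces maxcounts in a single scan over the stream that inserts an ngram at its first occurrence and bumps it whenever a larger per-reference count appears, instead of A's nested count_ngrams dict per reference followed by an explicit per-ngram max-merge loop.
import Mathlib
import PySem

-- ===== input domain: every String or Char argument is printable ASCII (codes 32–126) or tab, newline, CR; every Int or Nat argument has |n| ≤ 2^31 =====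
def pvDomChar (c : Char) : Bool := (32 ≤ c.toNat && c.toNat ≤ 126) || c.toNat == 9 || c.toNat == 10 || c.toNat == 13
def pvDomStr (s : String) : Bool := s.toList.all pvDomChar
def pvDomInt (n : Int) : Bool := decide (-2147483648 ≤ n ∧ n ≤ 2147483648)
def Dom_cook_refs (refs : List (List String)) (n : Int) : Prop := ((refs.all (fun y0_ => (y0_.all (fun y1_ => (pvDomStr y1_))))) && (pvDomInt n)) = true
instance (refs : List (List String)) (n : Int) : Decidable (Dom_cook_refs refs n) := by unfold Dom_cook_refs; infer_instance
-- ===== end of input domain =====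

-- B replaces A's per-reference count_ngrams dicts and max-merge loop with one flat stream of
-- (reference-index, ngram) occurrence pairs, one global pair-count pass, and one max-scan over
-- the stream; objective: alternative (same cost).

-- ===== PORT A =====
def count_ngrams (words : List String) (n : Int) : PySem.Dict (List String) Int :=
  (PySem.List.pyRange 1 (n + 1) 1).foldl (fun counts k =>
    (PySem.List.pyRange 0 ((words.length : Int) - k + 1) 1).foldl (fun counts i =>
      let ngram := PySem.List.slice words (some i) (some (i + k))
      counts.insert ngram (counts.getD ngram 0 + 1)) counts)
    PySem.Dict.empty

def cook_refs (refs : List (List String)) (n : Int) : List Int × (List (List String × Int)) :=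
  let refs' := refs.map (fun ref => ref)
  let maxcounts := refs'.foldl (fun mc ref =>
    let counts := count_ngrams ref n
    counts.items.foldl (fun mc p =>
      mc.insert p.1 (max (mc.getD p.1 0) p.2)) mc)
    PySem.Dict.empty
  (refs'.map (fun ref => (ref.length : Int)), maxcounts.items)

-- ===== PORT B =====
-- the stream comprehension of Source B: (j, tuple(ref[i:i+k])) over enumerate(refs), k, i
def pvStream (refs : List (List String)) (n : Int) : List (Int × List String) :=
  (PySem.List.enumerate refs 0).flatMap (fun jr =>
    (PySem.List.pyRange 1 (n + 1) 1).flatMap (fun k =>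
      (PySem.List.pyRange 0 ((jr.2.length : Int) - k + 1) 1).map (fun i =>
        (jr.1, PySem.List.slice jr.2 (some i) (some (i + k))))))

def cook_refs_alt (refs : List (List String)) (n : Int) : List Int × (List (List String × Int)) :=
  let refs' := refs.map (fun ref => ref)
  let stream := pvStream refs' n
  let pair_counts := stream.foldl (fun d p => d.insert p (d.getD p 0 + 1)) PySem.Dict.empty
  let maxcounts := stream.foldl (fun mc p =>
      let c : Int := pair_counts.getD p 0
      if !mc.contains p.2 || decide (mc.getD p.2 0 < c) then mc.insert p.2 c else mc)
    PySem.Dict.empty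
  (refs'.map (fun ref => (ref.length : Int)), maxcounts.items)

-- ===== PRECONDITION & SPEC =====
def Spec_cook_refs (refs : List (List String)) (n : Int) (out : List Int × (List (List String × Int))) : Prop := out = cook_refs_alt refs n
instance (refs : List (List String)) (n : Int) (out : List Int × (List (List String × Int))) : Decidable (Spec_cook_refs refs n out) := by unfold Spec_cook_refs; infer_instance

-- ===== CLAIM (what is proved, stated in full; the proofs are below) =====
def Claim_equal_cook_refs : Prop := ∀ (refs : List (List String)) (n : Int), Dom_cook_refs refs n → Spec_cook_refs refs n (cook_refs refs n)

-- ===== LEMMAS AND PROOFS =====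

-- the ngram list of one reference (A's enumeration order: k outer, i inner)
def pvNgrams (r : List String) (n : Int) : List (List String) :=
  (PySem.List.pyRange 1 (n + 1) 1).flatMap (fun k =>
    (PySem.List.pyRange 0 ((r.length : Int) - k + 1) 1).map (fun i =>
      PySem.List.slice r (some i) (some (i + k))))

-- the two fold steps the proof compares, with the count function f held fixed
def pvStepA (f : List String → Int) (mc : PySem.Dict (List String) Int) (ng : List String) :
    PySem.Dict (List String) Int :=
  mc.insert ng (max (mc.getD ng 0) (f ng))

def pvStepB (f : List String → Int) (mc : PySem.Dict (List String) Int) (ng : List String) :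
    PySem.Dict (List String) Int :=
  if !mc.contains ng || decide (mc.getD ng 0 < f ng) then mc.insert ng (f ng) else mc

lemma stream_eq (refs : List (List String)) (n : Int) :
    pvStream refs n = (PySem.List.enumerate refs 0).flatMap
      (fun jr => (pvNgrams jr.2 n).map (fun ng => (jr.1, ng))) := by
  simp [pvStream, pvNgrams, List.map_flatMap, List.map_map, Function.comp_def]

-- A's nested counting loops build exactly Counter(pvNgrams words n)
lemma count_ngrams_eq (words : List String) (n : Int) :
    count_ngrams words n = PySem.Dict.counter (pvNgrams words n) := by
  unfold count_ngrams pvNgrams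
  rw [← PySem.Dict.foldl_insert_getD_add_one_eq_counter, List.foldl_flatMap]
  simp [List.foldl_map]

-- counting a tagged pair in the flat stream = counting the ngram in its own reference's block
lemma count_tagged_zero (t : List (Int × List String)) (n j : Int) (ng : List String)
    (h : ∀ q ∈ t, q.1 ≠ j) :
    (t.flatMap (fun p => (pvNgrams p.2 n).map (fun x => (p.1, x)))).count (j, ng) = 0 := by
  rw [List.count_eq_zero]
  intro hmem
  obtain ⟨q, hq, hx⟩ := List.mem_flatMap.1 hmem
  obtain ⟨x, _, hx2⟩ := List.mem_map.1 hx
  exact h q hq (by simpa using congrArg Prod.fst hx2)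

lemma count_stream (l : List (Int × List String)) (n : Int)
    (hpw : l.Pairwise (fun p q => p.1 < q.1)) (jr : Int × List String) (hm : jr ∈ l)
    (ng : List String) :
    (l.flatMap (fun p => (pvNgrams p.2 n).map (fun x => (p.1, x)))).count (jr.1, ng)
      = (pvNgrams jr.2 n).count ng := by
  induction l with
  | nil => cases hm
  | cons p t ih =>
    rw [List.flatMap_cons, List.count_append]
    rcases List.mem_cons.1 hm with h | h
    · subst h
      rw [count_tagged_zero t n jr.1 ng
        (fun q hq => ne_of_gt ((List.pairwise_cons.1 hpw).1 q hq))]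
      rw [List.count_map_of_injective _ _ (fun a b hab => by simpa using hab) ng]
      omega
    · have hne : p.1 ≠ jr.1 := ne_of_lt ((List.pairwise_cons.1 hpw).1 jr h)
      have h0 : ((pvNgrams p.2 n).map (fun x => (p.1, x))).count (jr.1, ng) = 0 := by
        rw [List.count_eq_zero]
        intro hmem
        obtain ⟨x, _, hx2⟩ := List.mem_map.1 hmem
        exact hne (by simpa using congrArg Prod.fst hx2)
      rw [h0, ih (List.pairwise_cons.1 hpw).2 h]
      omega

-- overwriting an existing key with its own value is a no-op
lemma insert_getD_self (d : PySem.Dict (List String) Int) (k : List String)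
    (hc : d.contains k = true) (hn : d.keys.Nodup) :
    d.insert k (d.getD k 0) = d := by
  apply PySem.Dict.ext
  rw [PySem.Dict.items_insert_of_contains _ _ hc]
  conv_rhs => rw [← List.map_id d.items]
  refine List.map_congr_left (fun p hp => ?_)
  obtain ⟨k', v⟩ := p
  by_cases h : k' = k
  · subst h
    have hget : d.getD k' 0 = v := PySem.Dict.getD_of_mem_items d hp hn 0
    simp [hget]
  · simp [h]

lemma stepA_noop (f : List String → Int) (mc : PySem.Dict (List String) Int) (a : List String)
    (hn : mc.keys.Nodup) (hc : mc.contains a = true) (hle : f a ≤ mc.getD a 0) :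
    pvStepA f mc a = mc := by
  unfold pvStepA
  rw [max_eq_left hle, insert_getD_self mc a hc hn]

-- B's conditional step agrees with A's max-insert step pointwise (counts are ≥ 1)
lemma stepB_eq_stepA (f : List String → Int) (mc : PySem.Dict (List String) Int)
    (a : List String) (hn : mc.keys.Nodup) (hf : 1 ≤ f a) :
    pvStepB f mc a = pvStepA f mc a := by
  unfold pvStepB pvStepA
  by_cases hc : mc.contains a = true
  · by_cases hlt : mc.getD a 0 < f a
    · rw [max_eq_right hlt.le]; simp [hc, hlt]
    · have hcond : ¬((!mc.contains a || decide (mc.getD a 0 < f a)) = true) := by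
        simp [hc, hlt]
      rw [if_neg hcond, max_eq_left (not_lt.1 hlt), insert_getD_self mc a hc hn]
  · have h0 : mc.getD a 0 = 0 :=
      PySem.Dict.getD_of_not_contains mc 0 (by simpa using hc)
    have hmax : max (mc.getD a 0) (f a) = f a := by rw [h0]; omega
    simp [hc, hmax]

lemma nodup_stepA (f : List String → Int) (mc : PySem.Dict (List String) Int) (a : List String)
    (hn : mc.keys.Nodup) : (pvStepA f mc a).keys.Nodup :=
  PySem.Dict.nodup_keys_insert _ _ _ hn

lemma nodup_foldl_stepA (f : List String → Int) (l : List (List String)) :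
    ∀ (mc : PySem.Dict (List String) Int), mc.keys.Nodup →
    (l.foldl (pvStepA f) mc).keys.Nodup := by
  induction l with
  | nil => intro mc hn; exact hn
  | cons a t ih => intro mc hn; exact ih _ (nodup_stepA f mc a hn)

-- the full-occurrence fold with B's step equals the one with A's step
lemma foldl_stepB_eq_stepA (f : List String → Int) (xs : List (List String)) :
    ∀ (mc : PySem.Dict (List String) Int), mc.keys.Nodup → (∀ a ∈ xs, 1 ≤ f a) →
    xs.foldl (pvStepB f) mc = xs.foldl (pvStepA f) mc := by
  induction xs with
  | nil => intro _ _ _; rfl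
  | cons a t ih =>
    intro mc hn hf
    simp only [List.foldl_cons]
    rw [stepB_eq_stepA f mc a hn (hf a List.mem_cons_self)]
    exact ih _ (nodup_stepA f mc a hn) (fun b hb => hf b (List.mem_cons_of_mem _ hb))

-- once an ngram is processed, 'contains it and holds at least f of it' persists through the fold
lemma stepA_invariant (f : List String → Int) (l : List (List String)) (a : List String) :
    ∀ (mc : PySem.Dict (List String) Int),
    mc.contains a = true → f a ≤ mc.getD a 0 →
    (l.foldl (pvStepA f) mc).contains a = true ∧ f a ≤ (l.foldl (pvStepA f) mc).getD a 0 := by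
  induction l with
  | nil => intro mc h1 h2; exact ⟨h1, h2⟩
  | cons b t ih =>
    intro mc h1 h2
    simp only [List.foldl_cons]
    by_cases hb : a = b
    · subst hb
      refine ih _ ?_ ?_
      · show (mc.insert a (max (mc.getD a 0) (f a))).contains a = true
        rw [PySem.Dict.contains_insert]; simp
      · show f a ≤ (mc.insert a (max (mc.getD a 0) (f a))).getD a 0
        rw [PySem.Dict.getD_insert_self]
        omega
    · refine ih _ ?_ ?_
      · show (mc.insert b (max (mc.getD b 0) (f b))).contains a = true
        rw [PySem.Dict.contains_insert]; simp [h1]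
      · show f a ≤ (mc.insert b (max (mc.getD b 0) (f b))).getD a 0
        rw [PySem.Dict.getD_insert_of_ne mc _ _ hb]
        exact h2

lemma stepA_processed (f : List String → Int) (ys : List (List String)) (a : List String) :
    ∀ (mc : PySem.Dict (List String) Int), a ∈ ys →
    (ys.foldl (pvStepA f) mc).contains a = true ∧ f a ≤ (ys.foldl (pvStepA f) mc).getD a 0 := by
  induction ys with
  | nil => intro _ h; cases h
  | cons b t ih =>
    intro mc hmem
    simp only [List.foldl_cons]
    rcases List.mem_cons.1 hmem with h | h
    · subst h
      refine stepA_invariant f t a _ ?_ ?_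
      · show (mc.insert a (max (mc.getD a 0) (f a))).contains a = true
        rw [PySem.Dict.contains_insert]; simp
      · show f a ≤ (mc.insert a (max (mc.getD a 0) (f a))).getD a 0
        rw [PySem.Dict.getD_insert_self]
        omega
    · exact ih _ h

-- folding A's step over all occurrences = folding it over the distinct ngrams (first occurrences)
lemma foldl_stepA_dedup (f : List String → Int) (xs : List (List String)) :
    ∀ (mc : PySem.Dict (List String) Int), mc.keys.Nodup →
    xs.foldl (pvStepA f) mc = (PySem.Set.ofList xs).foldl (pvStepA f) mc := by
  induction xs using List.reverseRecOn with
  | nil => intro _ _; rfl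
  | append_singleton ys a ih =>
    intro mc hn
    have hof : PySem.Set.ofList (ys ++ [a]) = PySem.Set.add (PySem.Set.ofList ys) a := by
      rw [PySem.Set.ofList_eq_foldl, PySem.Set.ofList_eq_foldl, List.foldl_append]
      rfl
    rw [List.foldl_append, hof]
    simp only [List.foldl_cons, List.foldl_nil]
    by_cases hmem : a ∈ ys
    · have hproc := stepA_processed f ys a mc hmem
      rw [stepA_noop f _ a (nodup_foldl_stepA f ys mc hn) hproc.1 hproc.2]
      have hin : a ∈ PySem.Set.ofList ys := (PySem.Set.mem_ofList ys a).2 hmem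
      have hadd : PySem.Set.add (PySem.Set.ofList ys) a = PySem.Set.ofList ys := by
        simp [PySem.Set.add, PySem.Set.contains, hin]
      rw [hadd]
      exact ih mc hn
    · have hnin : a ∉ PySem.Set.ofList ys := fun h => hmem ((PySem.Set.mem_ofList ys a).1 h)
      have hadd : PySem.Set.add (PySem.Set.ofList ys) a = PySem.Set.ofList ys ++ [a] := by
        simp [PySem.Set.add, PySem.Set.contains, hnin]
      rw [hadd, List.foldl_append, ih mc hn]
      simp

-- A's merge of one reference's counter into mc = B's occurrence fold over that reference
lemma per_ref_eq (r : List String) (n : Int) (mc : PySem.Dict (List String) Int)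
    (hn : mc.keys.Nodup) :
    (count_ngrams r n).items.foldl (fun mc p => mc.insert p.1 (max (mc.getD p.1 0) p.2)) mc
      = (pvNgrams r n).foldl (pvStepB (fun ng => ((pvNgrams r n).count ng : Int))) mc := by
  rw [count_ngrams_eq, PySem.Dict.items_counter, List.foldl_map]
  rw [foldl_stepB_eq_stepA _ _ mc hn
    (fun a ha => by exact_mod_cast List.count_pos_iff.mpr ha)]
  rw [foldl_stepA_dedup _ _ mc hn]
  rfl

lemma nodup_foldl_stepB (f : List String → Int) (l : List (List String)) :
    ∀ (mc : PySem.Dict (List String) Int), mc.keys.Nodup →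
    (l.foldl (pvStepB f) mc).keys.Nodup := by
  induction l with
  | nil => intro mc hn; exact hn
  | cons a t ih =>
    intro mc hn
    simp only [List.foldl_cons]
    unfold pvStepB
    split
    · exact ih _ (PySem.Dict.nodup_keys_insert _ _ _ hn)
    · exact ih _ hn

-- outer fold: A's per-reference merges = B's per-block occurrence folds
lemma outer_eq (n : Int) (refs : List (List String)) :
    ∀ (mc : PySem.Dict (List String) Int), mc.keys.Nodup →
    refs.foldl (fun mc ref =>
        (count_ngrams ref n).items.foldl (fun mc p =>
          mc.insert p.1 (max (mc.getD p.1 0) p.2)) mc) mc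
      = refs.foldl (fun mc r =>
          (pvNgrams r n).foldl (pvStepB (fun ng => ((pvNgrams r n).count ng : Int))) mc) mc := by
  induction refs with
  | nil => intro _ _; rfl
  | cons r t ih =>
    intro mc hn
    simp only [List.foldl_cons]
    rw [per_ref_eq r n mc hn]
    exact ih _ (nodup_foldl_stepB _ _ mc hn)

-- B's global max-scan, reorganised block by block with the global pair counts resolved per block
lemma b_fold_eq (refs : List (List String)) (n : Int) :
    (pvStream refs n).foldl (fun mc p =>
        let c : Int := (PySem.Dict.counter (pvStream refs n)).getD p 0
        if !mc.contains p.2 || decide (mc.getD p.2 0 < c) then mc.insert p.2 c else mc)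
      PySem.Dict.empty
      = refs.foldl (fun mc r =>
          (pvNgrams r n).foldl (pvStepB (fun ng => ((pvNgrams r n).count ng : Int))) mc)
        PySem.Dict.empty := by
  rw [stream_eq, List.foldl_flatMap]
  have hcong : ∀ (mc : PySem.Dict (List String) Int),
      ∀ jr ∈ PySem.List.enumerate refs 0,
      ((pvNgrams jr.2 n).map (fun ng => (jr.1, ng))).foldl (fun mc p =>
        let c : Int := (PySem.Dict.counter ((PySem.List.enumerate refs 0).flatMap
          (fun jr => (pvNgrams jr.2 n).map (fun ng => (jr.1, ng))))).getD p 0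
        if !mc.contains p.2 || decide (mc.getD p.2 0 < c) then mc.insert p.2 c else mc) mc
      = (pvNgrams jr.2 n).foldl (pvStepB (fun ng => ((pvNgrams jr.2 n).count ng : Int))) mc := by
    intro mc jr hjr
    rw [List.foldl_map]
    refine PySem.List.foldl_congr_mem _ _ _ _ (fun acc x _ => ?_)
    have hc : (PySem.Dict.counter ((PySem.List.enumerate refs 0).flatMap
        (fun jr => (pvNgrams jr.2 n).map (fun ng => (jr.1, ng))))).getD (jr.1, x) 0
        = ((pvNgrams jr.2 n).count x : Int) := by
      rw [PySem.Dict.getD_counter]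
      exact_mod_cast count_stream (PySem.List.enumerate refs 0) n
        (PySem.List.pairwise_lt_enumerate refs 0) jr hjr x
    simp only [hc]
    rfl
  rw [PySem.List.foldl_congr_mem _ _ _ _ hcong]
  conv_rhs => rw [← PySem.List.map_snd_enumerate refs 0]
  rw [List.foldl_map]

-- ===== VERDICT (by name: the statement is the Claim_ definition above) =====
theorem cook_refs_spec : Claim_equal_cook_refs := by
  intro refs n _
  unfold Spec_cook_refs cook_refs cook_refs_alt
  simp only [List.map_id']
  rw [PySem.Dict.foldl_insert_getD_add_one_eq_counter]
  rw [b_fold_eq refs n, outer_eq n refs PySem.Dict.empty (by simp)]
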